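-- pv_equiv track=rewrite | github.com/harshvardhanraju/Design_and_analysis_of_algorithms | doc_dist.py | generate_vectors
-- ===== SOURCE A (Python) =====
-- def generate_vectors(freq1_dict, freq2_dict):
--     freq1_vec, freq2_vec = [], []
--     for key1 in freq1_dict.keys():
--         if key1 in freq2_dict.keys():
--             freq1_vec.append(freq1_dict[key1])
--             freq2_vec.append(freq2_dict[key1])
--         elif key1 not in freq2_dict.keys():
--             freq1_vec.append(freq1_dict[key1])
--             freq2_vec.append(0)
--     for key2 in freq2_dict.keys():
--         if key2 not in freq1_dict.keys():
--             freq1_vec.append(0)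
--             freq2_vec.append(freq2_dict[key2])
--     return freq1_vec, freq2_vec
-- ===== SOURCE B (Python) =====
-- def generate_vectors(freq1_dict, freq2_dict):
--     merged = {k: (v, 0) for k, v in freq1_dict.items()}
--     for k, v in freq2_dict.items():
--         merged[k] = (merged.get(k, (0, 0))[0], v)
--     pairs = list(merged.values())
--     return [p[0] for p in pairs], [p[1] for p in pairs]
-- ===== Notes on version B (the rewrite author's own statement) =====
-- stated objective: alternative
-- what changed: B builds a single merged dict mapping each key to a (count1, count2) pair -- one insert pass per input dict, relying on dict overwrite-in-place/append-on-new semantics instead of membership tests -- and unzips its values at the end, where A grows two parallel vectors with key-membership branches.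
import Mathlib
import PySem

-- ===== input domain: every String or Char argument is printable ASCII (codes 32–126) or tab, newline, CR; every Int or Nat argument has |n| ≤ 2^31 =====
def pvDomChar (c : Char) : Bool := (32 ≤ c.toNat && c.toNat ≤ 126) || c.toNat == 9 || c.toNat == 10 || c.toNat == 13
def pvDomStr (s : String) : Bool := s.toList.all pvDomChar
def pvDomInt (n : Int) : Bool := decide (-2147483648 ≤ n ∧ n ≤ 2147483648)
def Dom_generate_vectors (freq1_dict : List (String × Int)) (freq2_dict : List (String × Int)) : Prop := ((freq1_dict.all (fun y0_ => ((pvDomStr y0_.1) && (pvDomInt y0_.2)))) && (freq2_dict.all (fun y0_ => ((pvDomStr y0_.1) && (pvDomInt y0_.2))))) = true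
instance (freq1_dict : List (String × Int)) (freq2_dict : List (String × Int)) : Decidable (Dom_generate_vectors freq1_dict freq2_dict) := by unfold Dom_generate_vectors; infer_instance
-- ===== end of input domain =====

-- B builds ONE merged dict key → (count1, count2) by two insert passes (dict overwrite
-- keeps position, new keys append) and unzips its values at the end, replacing A's
-- membership-tested parallel append loops (objective: alternative).

-- shared dict primitives on the association list (first match; getD 0 = Python .get(k,0))
def pvContains (d : List (String × Int)) (k : String) : Bool := d.any (fun p => p.1 == k)
def pvGetD (d : List (String × Int)) (k : String) : Int :=
  ((d.find? (fun p => p.1 == k)).map Prod.snd).getD 0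

-- ===== PORT A =====
def generate_vectors (freq1_dict : List (String × Int)) (freq2_dict : List (String × Int)) : List Int × List Int :=
  let s :=
    (freq1_dict.map Prod.fst).foldl
      (fun (acc : List Int × List Int) key1 =>
        if pvContains freq2_dict key1 then
          (acc.1 ++ [pvGetD freq1_dict key1], acc.2 ++ [pvGetD freq2_dict key1])
        else if ¬ pvContains freq2_dict key1 then
          (acc.1 ++ [pvGetD freq1_dict key1], acc.2 ++ [0])
        else acc)
      ([], [])
  (freq2_dict.map Prod.fst).foldl
    (fun (acc : List Int × List Int) key2 =>
      if ¬ pvContains freq1_dict key2 then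
        (acc.1 ++ [0], acc.2 ++ [pvGetD freq2_dict key2])
      else acc)
    s

-- ===== PORT B =====
def generate_vectors_alt (freq1_dict : List (String × Int)) (freq2_dict : List (String × Int)) : List Int × List Int :=
  let merged : PySem.Dict String (Int × Int) :=
    freq1_dict.foldl (fun d p => d.insert p.1 (p.2, (0 : Int))) PySem.Dict.empty
  let merged :=
    freq2_dict.foldl
      (fun d p => d.insert p.1 ((d.getD p.1 ((0 : Int), (0 : Int))).1, p.2)) merged
  let pairs := merged.values
  (pairs.map Prod.fst, pairs.map Prod.snd)

-- ===== PRECONDITION & SPEC =====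
-- Pre_ requires each association list to have pairwise-distinct keys: a list with a
-- duplicate key represents no Python dict (the callers pass dicts), and on such lists
-- the two ports' models of dict lookup (first match vs overwrite-in-place) diverge.
def Pre_generate_vectors (freq1_dict : List (String × Int)) (freq2_dict : List (String × Int)) : Prop :=
  (freq1_dict.map Prod.fst).Nodup ∧ (freq2_dict.map Prod.fst).Nodup
instance (freq1_dict : List (String × Int)) (freq2_dict : List (String × Int)) : Decidable (Pre_generate_vectors freq1_dict freq2_dict) := by unfold Pre_generate_vectors; infer_instance

def pvWitness_generate_vectors : (List (String × Int)) × (List (String × Int)) :=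
  ([("a", 1), ("b", 2)], [("b", 3), ("c", 4)])

def Spec_generate_vectors (freq1_dict : List (String × Int)) (freq2_dict : List (String × Int)) (out : List Int × List Int) : Prop := out = generate_vectors_alt freq1_dict freq2_dict
instance (freq1_dict : List (String × Int)) (freq2_dict : List (String × Int)) (out : List Int × List Int) : Decidable (Spec_generate_vectors freq1_dict freq2_dict out) := by unfold Spec_generate_vectors; infer_instance

-- ===== CLAIM (what is proved, stated in full; the proofs are below) =====
def Claim_equal_generate_vectors : Prop := ∀ (freq1_dict : List (String × Int)) (freq2_dict : List (String × Int)), Dom_generate_vectors freq1_dict freq2_dict → Pre_generate_vectors freq1_dict freq2_dict → Spec_generate_vectors freq1_dict freq2_dict (generate_vectors freq1_dict freq2_dict)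

-- ===== LEMMAS AND PROOFS =====

lemma pvGetD_eq_zero (d : List (String × Int)) (k : String)
    (h : pvContains d k = false) : pvGetD d k = 0 := by
  unfold pvContains at h
  unfold pvGetD
  have : d.find? (fun p => p.1 == k) = none := by
    rw [List.find?_eq_none]
    intro x hx
    simp only [List.any_eq_false] at h
    exact h x hx
  simp [this]

lemma pvGetD_of_mem (l : List (String × Int)) (h : (l.map Prod.fst).Nodup)
    (p : String × Int) (hp : p ∈ l) : pvGetD l p.1 = p.2 := by
  induction l with
  | nil => cases hp
  | cons a tl ih =>
    rcases List.mem_cons.1 hp with rfl | htl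
    · unfold pvGetD
      simp
    · have hne : a.1 ≠ p.1 := by
        simp only [List.map_cons, List.nodup_cons] at h
        intro he
        exact h.1 (he ▸ List.mem_map.2 ⟨p, htl, rfl⟩)
      have := ih (by simpa using (List.nodup_cons.1 (by simpa using h)).2) htl
      unfold pvGetD at this ⊢
      rw [List.find?_cons_of_neg (by simpa using hne)]
      exact this

-- A's two loops, characterised (same as a direct union-of-keys reading of A).

lemma loop1_eq (l1 l2 : List (String × Int)) (ks : List String) (acc : List Int × List Int) :
    ks.foldl
      (fun (acc : List Int × List Int) key1 =>
        if pvContains l2 key1 then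
          (acc.1 ++ [pvGetD l1 key1], acc.2 ++ [pvGetD l2 key1])
        else if ¬ pvContains l2 key1 then
          (acc.1 ++ [pvGetD l1 key1], acc.2 ++ [0])
        else acc) acc
    = (acc.1 ++ ks.map (fun k => pvGetD l1 k), acc.2 ++ ks.map (fun k => pvGetD l2 k)) := by
  induction ks generalizing acc with
  | nil => simp
  | cons k ks ih =>
    rw [List.foldl_cons]
    by_cases h : pvContains l2 k = true
    · rw [if_pos h, ih]
      simp
    · have h0 : pvGetD l2 k = 0 := pvGetD_eq_zero l2 k (by simpa using h)
      rw [if_neg h, if_pos h, ih]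
      simp [h0]

lemma loop2_eq (l1 l2 : List (String × Int)) (ks : List String) (acc : List Int × List Int) :
    ks.foldl
      (fun (acc : List Int × List Int) key2 =>
        if ¬ pvContains l1 key2 then
          (acc.1 ++ [0], acc.2 ++ [pvGetD l2 key2])
        else acc) acc
    = (acc.1 ++ (ks.filter (fun k => ¬ pvContains l1 k)).map (fun _ => (0 : Int)),
       acc.2 ++ (ks.filter (fun k => ¬ pvContains l1 k)).map (fun k => pvGetD l2 k)) := by
  induction ks generalizing acc with
  | nil => simp
  | cons k ks ih =>
    rw [List.foldl_cons]
    by_cases h : pvContains l1 k = true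
    · rw [if_neg (not_not_intro h), ih]
      simp [h]
    · rw [if_pos h, ih]
      simp [h]

-- the ordered union of keys both sides realise
def pvKeys (l1 l2 : List (String × Int)) : List String :=
  l1.map Prod.fst ++ (l2.map Prod.fst).filter (fun k => ¬ pvContains l1 k)

lemma generate_vectors_eq_keys (l1 l2 : List (String × Int)) :
    generate_vectors l1 l2 =
      ((pvKeys l1 l2).map (fun k => pvGetD l1 k), (pvKeys l1 l2).map (fun k => pvGetD l2 k)) := by
  unfold generate_vectors pvKeys
  rw [loop1_eq, loop2_eq]
  have hz : ((l2.map Prod.fst).filter (fun k => ¬ pvContains l1 k)).map (fun k => pvGetD l1 k)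
      = ((l2.map Prod.fst).filter (fun k => ¬ pvContains l1 k)).map (fun _ => (0 : Int)) := by
    apply List.map_congr_left
    intro k hk
    have := List.of_mem_filter hk
    exact pvGetD_eq_zero l1 k (by simpa using this)
  simp only [List.nil_append, List.map_append, hz]

-- B side: phase 1 items
lemma phase1_items (l1 : List (String × Int)) (h : (l1.map Prod.fst).Nodup) :
    (l1.foldl (fun d p => d.insert p.1 (p.2, (0 : Int))) PySem.Dict.empty).items
      = l1.map (fun p => (p.1, (p.2, (0 : Int)))) := by
  have := PySem.Dict.items_foldl_insert_fresh l1 (fun p => p.1) (fun p => (p.2, (0 : Int)))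
    PySem.Dict.empty (by intro a _; simp) (by simpa using h)
  simpa using this

lemma phase1_getD (l1 : List (String × Int)) (h : (l1.map Prod.fst).Nodup) (k : String) :
    (l1.foldl (fun d p => d.insert p.1 (p.2, (0 : Int))) PySem.Dict.empty).getD k ((0 : Int), (0 : Int))
      = (pvGetD l1 k, 0) := by
  set d1 := l1.foldl (fun d p => d.insert p.1 (p.2, (0 : Int))) PySem.Dict.empty with hd1
  have hkeys : d1.keys = l1.map Prod.fst := by
    show d1.items.map Prod.fst = _
    rw [hd1, phase1_items l1 h]
    simp
  by_cases hc : pvContains l1 k = true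
  · have hc' : ∃ p ∈ l1, p.1 = k := by
      simpa [pvContains, List.any_eq_true] using hc
    obtain ⟨p, hp, hpk⟩ := hc'
    have hmem : (k, (p.2, (0 : Int))) ∈ d1.items := by
      rw [hd1, phase1_items l1 h]
      exact List.mem_map.2 ⟨p, hp, by simp [hpk]⟩
    have hget := PySem.Dict.getD_of_mem_items (d := d1) hmem (by rw [hkeys]; exact h)
      (d0 := ((0 : Int), (0 : Int)))
    have hpv : pvGetD l1 k = p.2 := by
      have := pvGetD_of_mem l1 h p hp
      rwa [hpk] at this
    rw [hget, hpv]
  · have hnc : d1.contains k = false := by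
      rw [PySem.Dict.contains_eq_decide_mem_keys, hkeys]
      simp only [decide_eq_false_iff_not]
      intro hk
      obtain ⟨p, hp, rfl⟩ := List.mem_map.1 hk
      exact hc (by simp only [pvContains, List.any_eq_true]; exact ⟨p, hp, by simp⟩)
    rw [PySem.Dict.getD_of_not_contains (h := hnc),
      pvGetD_eq_zero l1 k (by simpa using hc)]

-- phase 2 lookup characterisation
lemma phase2_getD (l1 l2 : List (String × Int)) (d : PySem.Dict String (Int × Int))
    (h2 : (l2.map Prod.fst).Nodup)
    (hfst : ∀ k, (d.getD k ((0 : Int), (0 : Int))).1 = pvGetD l1 k) (k : String) :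
    (l2.foldl (fun d p => d.insert p.1 ((d.getD p.1 ((0 : Int), (0 : Int))).1, p.2)) d).getD k ((0 : Int), (0 : Int))
      = if pvContains l2 k then (pvGetD l1 k, pvGetD l2 k) else d.getD k ((0 : Int), (0 : Int)) := by
  induction l2 generalizing d with
  | nil => simp [pvContains]
  | cons p tl ih =>
    have hp_notin : p.1 ∉ tl.map Prod.fst := by
      simp only [List.map_cons, List.nodup_cons] at h2
      exact h2.1
    have h2' : (tl.map Prod.fst).Nodup := by
      simp only [List.map_cons, List.nodup_cons] at h2
      exact h2.2
    set d' := d.insert p.1 ((d.getD p.1 ((0 : Int), (0 : Int))).1, p.2) with hd'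
    have hfst' : ∀ k', (d'.getD k' ((0 : Int), (0 : Int))).1 = pvGetD l1 k' := by
      intro k'
      rw [hd', PySem.Dict.getD_insert]
      split_ifs with he
      · rw [he]; simpa using hfst p.1
      · exact hfst k'
    rw [List.foldl_cons, ih d' h2' hfst']
    have hctl : pvContains tl p.1 = false := by
      simp only [pvContains, List.any_eq_false]
      intro q hq hqk
      exact hp_notin (List.mem_map.2 ⟨q, hq, by simpa using hqk⟩)
    by_cases hk : k = p.1
    · subst hk
      rw [hctl]
      rw [if_neg (by simp : ¬ (false = true))]
      have hch : pvContains (p :: tl) p.1 = true := by simp [pvContains]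
      rw [if_pos hch, hd', PySem.Dict.getD_insert, if_pos rfl]
      have hg : pvGetD (p :: tl) p.1 = p.2 := by
        unfold pvGetD
        simp
      rw [hg, hfst]
    · have hcons_c : pvContains (p :: tl) k = pvContains tl k := by
        simp [pvContains, List.any_cons, (by simpa using (Ne.symm hk) : (p.1 == k) = false)]
      have hcons_g : pvGetD (p :: tl) k = pvGetD tl k := by
        unfold pvGetD
        rw [List.find?_cons_of_neg (by simpa using (Ne.symm hk))]
      have hd'k : d'.getD k ((0 : Int), (0 : Int)) = d.getD k ((0 : Int), (0 : Int)) := by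
        rw [hd', PySem.Dict.getD_insert, if_neg hk]
      rw [hcons_c, hcons_g, hd'k]

lemma generate_vectors_alt_eq_keys (l1 l2 : List (String × Int))
    (h1 : (l1.map Prod.fst).Nodup) (h2 : (l2.map Prod.fst).Nodup) :
    generate_vectors_alt l1 l2 =
      ((pvKeys l1 l2).map (fun k => pvGetD l1 k), (pvKeys l1 l2).map (fun k => pvGetD l2 k)) := by
  unfold generate_vectors_alt
  dsimp only []
  set d1 := l1.foldl (fun d p => d.insert p.1 (p.2, (0 : Int))) PySem.Dict.empty with hd1
  set d2 := l2.foldl (fun d p => d.insert p.1 ((d.getD p.1 ((0 : Int), (0 : Int))).1, p.2)) d1 with hd2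
  have hkeys1 : d1.keys = l1.map Prod.fst := by
    show d1.items.map Prod.fst = _
    rw [hd1, phase1_items l1 h1]
    simp
  have hnd1 : d1.keys.Nodup := by rw [hkeys1]; exact h1
  have hnd2 : d2.keys.Nodup := by
    rw [hd2]
    exact PySem.Dict.nodup_keys_foldl_insert_key l2 (fun p => p.1) _ d1 hnd1
  have hkeys2 : d2.keys = pvKeys l1 l2 := by
    rw [hd2, PySem.Dict.keys_foldl_insert_key, PySem.Set.update_eq_append_filter,
      PySem.Set.ofList_eq_self_of_nodup _ h2, hkeys1]
    unfold pvKeys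
    congr 1
    apply List.filter_congr
    intro k hk
    have hcc : PySem.Set.contains (l1.map Prod.fst) k = pvContains l1 k := by
      simp only [PySem.Set.contains, pvContains]
      by_cases h : k ∈ List.map Prod.fst l1
      · obtain ⟨q, hq, rfl⟩ := List.mem_map.1 h
        have : l1.any (fun p => p.1 == q.1) = true := by
          rw [List.any_eq_true]
          exact ⟨q, hq, by simp⟩
        simp [this, List.mem_map.2 ⟨q, hq, rfl⟩]
      · have : l1.any (fun p => p.1 == k) = false := by
          rw [List.any_eq_false]
          intro q hq hqk
          exact h (List.mem_map.2 ⟨q, hq, by simpa using hqk⟩)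
        simp [this, h]
    rw [hcc]
    cases hpc : pvContains l1 k <;> simp
  have hgetD : ∀ k, d2.getD k ((0 : Int), (0 : Int)) = (pvGetD l1 k, pvGetD l2 k) := by
    intro k
    rw [hd2, phase2_getD l1 l2 d1 h2 (fun k' => by rw [phase1_getD l1 h1 k']) k]
    split_ifs with hc
    · rfl
    · rw [phase1_getD l1 h1 k, pvGetD_eq_zero l2 k (by simpa using hc)]
  have hvals : d2.values = (pvKeys l1 l2).map (fun k => (pvGetD l1 k, pvGetD l2 k)) := by
    have := PySem.Dict.values_eq_map_keys d2 hnd2 ((0 : Int), (0 : Int))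
    rw [this, hkeys2]
    exact List.map_congr_left (fun k _ => hgetD k)
  rw [hvals]
  simp

-- ===== VERDICT (by name: the statement is the Claim_ definition above) =====
theorem generate_vectors_spec : Claim_equal_generate_vectors := by
  intro l1 l2 _ hpre
  unfold Spec_generate_vectors
  rw [generate_vectors_eq_keys, generate_vectors_alt_eq_keys l1 l2 hpre.1 hpre.2]
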